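-- pv_equiv track=rewrite | github.com/nickwu241/advent-of-code-2018 | day5/day5.py | get_after_reaction_length
-- ===== SOURCE A (Python) =====
-- def get_after_reaction_length(s):
--     stack = []
--     for char in s:
--         if stack and abs(ord(stack[-1]) - ord(char)) == 32:
--             stack.pop()
--         else:
--             stack.append(char)
--     return len(stack)
-- ===== SOURCE B (Python) =====
-- def get_after_reaction_length(s):
--     units = list(s)
--     while True:
--         for i in range(len(units) - 1):
--             if abs(ord(units[i]) - ord(units[i + 1])) == 32:
--                 del units[i:i + 2]
--                 break
--         else:
--             return len(units)
-- ===== Notes on version B (the rewrite author's own statement) =====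
-- stated objective: alternative
-- what changed: Replaces A's single left-to-right pass with an explicit stack by repeated whole-string scans that each delete the leftmost adjacent pair whose ord-difference is 32, looping until no pair reacts; equality rests on a proved invariant that deleting the leftmost reacting pair never changes the stack result.
import Mathlib
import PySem

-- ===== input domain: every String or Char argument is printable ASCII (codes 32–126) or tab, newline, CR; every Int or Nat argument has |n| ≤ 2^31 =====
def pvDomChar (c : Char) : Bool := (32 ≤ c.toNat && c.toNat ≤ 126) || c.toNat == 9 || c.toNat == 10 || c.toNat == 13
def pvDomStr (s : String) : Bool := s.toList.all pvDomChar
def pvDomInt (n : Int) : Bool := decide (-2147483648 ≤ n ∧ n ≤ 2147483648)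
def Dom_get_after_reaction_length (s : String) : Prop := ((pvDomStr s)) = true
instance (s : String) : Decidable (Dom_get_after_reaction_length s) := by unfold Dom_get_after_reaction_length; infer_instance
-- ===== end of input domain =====

-- B replaces A's one-pass stack by repeatedly deleting the leftmost adjacent reacting pair
-- until none remains (alternative algorithm, not faster); return values proved equal on all strings.

-- abs(ord(x) - ord(y)) == 32 , the reaction test both Pythons use verbatim
def pvReact (a b : Char) : Bool := ((a.toNat : Int) - (b.toNat : Int)).natAbs == 32

-- ===== PORT A =====
-- one loop iteration of A: pop if the stack top reacts with char, else append
def pvStepA (stack : List Char) (c : Char) : List Char :=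
  match stack.getLast? with
  | some t => if pvReact t c then stack.dropLast else stack ++ [c]
  | none => stack ++ [c]

def get_after_reaction_length (s : String) : Int :=
  ((s.toList.foldl pvStepA []).length : Int)

-- ===== PORT B =====
-- Source B's inner for-scan: delete the leftmost adjacent reacting pair, none if no pair reacts
def pvRemove1 : List Char → Option (List Char)
  | a :: b :: t => if pvReact a b then some t else (pvRemove1 (b :: t)).map (a :: ·)
  | _ => none

-- termination measure for the while-loop below
theorem pvRemove1_length : ∀ {t u : List Char}, pvRemove1 t = some u → u.length < t.length := by
  intro t
  induction t using pvRemove1.induct with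
  | case1 a b r h =>
      intro u hu
      simp [pvRemove1, h] at hu
      subst hu; simp
  | case2 a b r h ih =>
      intro u hu
      rw [pvRemove1, if_neg h] at hu
      cases hv : pvRemove1 (b :: r) with
      | none => simp [hv] at hu
      | some v =>
          simp [hv] at hu
          subst hu
          simpa using Nat.succ_lt_succ (ih hv)
  | case3 t h1 =>
      intro u hu
      cases t with
      | nil => simp [pvRemove1] at hu
      | cons x xs =>
          cases xs with
          | nil => simp [pvRemove1] at hu
          | cons y ys => exact absurd rfl (h1 x y ys)

-- Source B's while-loop: repeat until a full scan deletes nothing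
def pvReduce (l : List Char) : List Char :=
  match h : pvRemove1 l with
  | some u => pvReduce u
  | none => l
termination_by l.length
decreasing_by exact pvRemove1_length h

def get_after_reaction_length_alt (s : String) : Int :=
  ((pvReduce s.toList).length : Int)

-- ===== PRECONDITION & SPEC =====
def Spec_get_after_reaction_length (s : String) (out : Int) : Prop := out = get_after_reaction_length_alt s
instance (s : String) (out : Int) : Decidable (Spec_get_after_reaction_length s out) := by unfold Spec_get_after_reaction_length; infer_instance

-- ===== CLAIM (what is proved, stated in full; the proofs are below) =====
def Claim_equal_get_after_reaction_length : Prop := ∀ (s : String), Dom_get_after_reaction_length s → Spec_get_after_reaction_length s (get_after_reaction_length s)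

-- ===== LEMMAS AND PROOFS =====

-- shorthand: adjacent characters do not react ("irreducible" strings are pvNR-chains)
def pvNR (a b : Char) : Prop := pvReact a b = false

-- A's stack leaves an irreducible string unchanged
theorem pvFoldl_irreducible : ∀ (p q : List Char), List.IsChain pvNR (q ++ p) →
    List.foldl pvStepA q p = q ++ p := by
  intro p
  induction p with
  | nil => intro q _; simp
  | cons c p' ih =>
      intro q hch
      have hstep : pvStepA q c = q ++ [c] := by
        cases hq : q.getLast? with
        | none => simp [pvStepA, hq]
        | some t =>
            have hnr : pvReact t c = false :=
              (List.isChain_append.mp hch).2.2 t hq c rfl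
            simp [pvStepA, hq, hnr]
      have hassoc : (q ++ [c]) ++ p' = q ++ c :: p' := by simp
      rw [List.foldl_cons, hstep, ih (q ++ [c]) (by rw [hassoc]; exact hch), hassoc]

-- deleting the leftmost reacting pair does not change A's stack, provided the part
-- already scanned (p, ending just before the pair) is irreducible
theorem pvFoldl_remove1 : ∀ (t u p : List Char), pvRemove1 t = some u →
    List.IsChain pvNR (p ++ t.take 1) →
    List.foldl pvStepA [] (p ++ t) = List.foldl pvStepA [] (p ++ u) := by
  intro t
  induction t using pvRemove1.induct with
  | case1 a b r h =>
      intro u p hu hch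
      simp [pvRemove1, h] at hu
      subst hu
      simp only [List.take_succ_cons, List.take_zero] at hch
      have hpa : List.foldl pvStepA [] (p ++ [a]) = p ++ [a] :=
        pvFoldl_irreducible (p ++ [a]) [] (by simpa using hch)
      have hp : List.foldl pvStepA [] p = p :=
        pvFoldl_irreducible p [] (by simpa using (List.isChain_append.mp hch).1)
      have hstep : pvStepA (p ++ [a]) b = p := by
        simp [pvStepA, h]
      calc List.foldl pvStepA [] (p ++ a :: b :: r)
          = List.foldl pvStepA [] ((p ++ [a]) ++ b :: r) := by simp
        _ = List.foldl pvStepA p r := by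
              rw [List.foldl_append, hpa, List.foldl_cons, hstep]
        _ = List.foldl pvStepA [] (p ++ r) := by rw [List.foldl_append, hp]
  | case2 a b r h ih =>
      intro u p hu hch
      rw [pvRemove1, if_neg h] at hu
      cases hv : pvRemove1 (b :: r) with
      | none => simp [hv] at hu
      | some v =>
          simp [hv] at hu
          subst hu
          simp only [List.take_succ_cons, List.take_zero] at hch
          have hch' : List.IsChain pvNR ((p ++ [a]) ++ (b :: r).take 1) := by
            simp only [List.take_succ_cons, List.take_zero]
            refine List.isChain_append.mpr ⟨hch, List.isChain_singleton b, ?_⟩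
            intro x hx y hy
            rw [List.getLast?_concat] at hx
            simp at hx hy
            subst hx; subst hy
            exact eq_false_of_ne_true h
          have := ih v (p ++ [a]) hv hch'
          simpa using this
  | case3 t h1 =>
      intro u p hu hch
      cases t with
      | nil => simp [pvRemove1] at hu
      | cons x xs =>
          cases xs with
          | nil => simp [pvRemove1] at hu
          | cons y ys => exact absurd rfl (h1 x y ys)

-- when the scan finds nothing, the string is irreducible
theorem pvRemove1_none : ∀ (t : List Char), pvRemove1 t = none → List.IsChain pvNR t := by
  intro t
  induction t using pvRemove1.induct with
  | case1 a b r h => intro hu; simp [pvRemove1, h] at hu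
  | case2 a b r h ih =>
      intro hu
      rw [pvRemove1, if_neg h] at hu
      rw [Option.map_eq_none_iff] at hu
      exact List.isChain_cons.mpr ⟨fun y hy => by
        simp at hy; subst hy; exact eq_false_of_ne_true h, ih hu⟩
  | case3 t h1 =>
      intro _
      cases t with
      | nil => exact List.isChain_nil
      | cons x xs =>
          cases xs with
          | nil => exact List.isChain_singleton x
          | cons y ys => exact absurd rfl (h1 x y ys)

-- A's stack equals B's fixpoint, as lists
theorem pvStack_eq_reduce : ∀ (l : List Char), List.foldl pvStepA [] l = pvReduce l := by
  intro l
  induction l using pvReduce.induct with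
  | case1 l u h ih =>
      have hch : List.IsChain pvNR ([] ++ l.take 1) := by
        cases l with
        | nil => exact List.isChain_nil
        | cons x xs => simp [List.isChain_singleton]
      have h1 := pvFoldl_remove1 l u [] h hch
      rw [pvReduce.eq_def, h]
      simpa using h1.trans ih
  | case2 l h =>
      rw [pvReduce.eq_def, h]
      exact pvFoldl_irreducible l [] (by simpa using pvRemove1_none l h)

-- ===== VERDICT (by name: the statement is the Claim_ definition above) =====
theorem get_after_reaction_length_spec : Claim_equal_get_after_reaction_length := by
  intro s _
  unfold Spec_get_after_reaction_length get_after_reaction_length get_after_reaction_length_alt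
  rw [pvStack_eq_reduce]
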